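-- pv_equiv track=rewrite | github.com/StanleyBack-dev/MegaSena_Analyzer | tratamentoDados.py | get_most_common_by_tens
-- ===== SOURCE A (Python) =====
-- from collections import Counter
--
-- def group_by_tens(number):
--     if number == 60:
--         return 50
--     return (number // 10) * 10
--
-- def get_most_common_by_tens(data):
--     numeros = [num for row in data for num in row]
--     counter = Counter(numeros)
--
--     grouped_by_tens = {}
--     for num, freq in counter.items():
--         tens = group_by_tens(num)
--         if tens not in grouped_by_tens:
--             grouped_by_tens[tens] = []
--         grouped_by_tens[tens].append((num, freq))
--
--     most_common_numbers = []
--     for tens, numbers in sorted(grouped_by_tens.items(), key=lambda x: x[0]):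
--         sorted_numbers = sorted(numbers, key=lambda x: x[1], reverse=True)
--         most_common_numbers.extend(num for num, freq in sorted_numbers[:6])
--     return most_common_numbers
-- ===== SOURCE B (Python) =====
-- from collections import Counter
--
-- def group_by_tens(number):
--     if number == 60:
--         return 50
--     return (number // 10) * 10
--
-- def get_most_common_by_tens(data):
--     counter = Counter(num for row in data for num in row)
--     items = sorted(counter.items(), key=lambda kv: (group_by_tens(kv[0]), -kv[1]))
--     out = []
--     cur, cnt = None, 0
--     for num, freq in items:
--         k = group_by_tens(num)
--         if k == cur:
--             if cnt < 6:
--                 out.append(num)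
--                 cnt += 1
--         else:
--             out.append(num)
--             cur, cnt = k, 1
--     return out
-- ===== Notes on version B (the rewrite author's own statement) =====
-- stated objective: alternative
-- what changed: B replaces A's dict-of-lists grouping followed by a separate sort inside every tens-bucket with one stable lexicographic sort of the counter items by (tens-group, -frequency) and a single scan that emits the first 6 numbers of each tens-run.
import Mathlib
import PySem

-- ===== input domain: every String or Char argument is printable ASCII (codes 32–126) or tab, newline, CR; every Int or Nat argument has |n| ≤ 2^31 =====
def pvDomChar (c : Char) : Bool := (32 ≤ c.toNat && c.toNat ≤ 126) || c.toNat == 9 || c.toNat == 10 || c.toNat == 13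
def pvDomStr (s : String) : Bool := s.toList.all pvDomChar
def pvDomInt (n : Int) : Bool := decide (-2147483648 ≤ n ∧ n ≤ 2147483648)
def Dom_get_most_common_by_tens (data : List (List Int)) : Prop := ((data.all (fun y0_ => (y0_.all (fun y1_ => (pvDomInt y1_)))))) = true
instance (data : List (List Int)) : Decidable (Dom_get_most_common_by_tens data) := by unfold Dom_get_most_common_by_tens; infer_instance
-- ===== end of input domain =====

-- B replaces A's dict-of-lists grouping plus a sort per bucket by ONE stable lexicographic
-- sort of the counter items followed by a single take-6-per-run scan (alternative decomposition).

-- ===== PORT A =====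
-- group_by_tens(number)
def pyGroupByTens (number : Int) : Int :=
  if number = 60 then 50 else (PySem.Int.floordiv number 10) * 10

def get_most_common_by_tens (data : List (List Int)) : List Int :=
  let numeros := data.flatMap (fun row => row)
  let counter := PySem.Dict.counter numeros
  let grouped := counter.items.foldl (fun d p =>
      let tens := pyGroupByTens p.1
      let d' := if ¬ d.contains tens then d.insert tens ([] : List (Int × Int)) else d
      d'.modify tens [] (fun l => l ++ [p])) PySem.Dict.empty
  (PySem.List.sorted grouped.items (fun x => x.1) false).foldl
    (fun acc p => acc ++ ((PySem.List.sorted p.2 (fun y => y.2) true).take 6).map (fun y => y.1)) []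

-- ===== PORT B =====
-- the for-loop of Source B: scan the lex-sorted items, emitting the first 6 numbers of each tens-run
def altScan (cur : Option Int) (cnt : Int) : List (Int × Int) → List Int
  | [] => []
  | p :: rest =>
    let k := pyGroupByTens p.1
    if some k = cur then
      (if cnt < 6 then p.1 :: altScan (some k) (cnt + 1) rest else altScan (some k) cnt rest)
    else p.1 :: altScan (some k) 1 rest

def get_most_common_by_tens_alt (data : List (List Int)) : List Int :=
  let counter := PySem.Dict.counter (data.flatMap (fun row => row))
  let items := PySem.List.sorted2 counter.items (fun kv => pyGroupByTens kv.1) (fun kv => -kv.2) false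
  altScan none 0 items

-- ===== PRECONDITION & SPEC =====
def Spec_get_most_common_by_tens (data : List (List Int)) (out : List Int) : Prop := out = get_most_common_by_tens_alt data
instance (data : List (List Int)) (out : List Int) : Decidable (Spec_get_most_common_by_tens data out) := by unfold Spec_get_most_common_by_tens; infer_instance

-- ===== CLAIM (what is proved, stated in full; the proofs are below) =====
def Claim_equal_get_most_common_by_tens : Prop := ∀ (data : List (List Int)), Dom_get_most_common_by_tens data → Spec_get_most_common_by_tens data (get_most_common_by_tens data)

-- ===== LEMMAS AND PROOFS =====

-- abbreviations used only by the proofs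
def pvLex (a b : Int × Int) : Bool :=
  decide (pyGroupByTens a.1 < pyGroupByTens b.1) ||
    (!decide (pyGroupByTens b.1 < pyGroupByTens a.1) && decide ((-a.2 : Int) < -b.2))

def pvW (a b : Int × Int) : Bool := decide (b.2 < a.2)

def pvBucket (xs : List (Int × Int)) (t : Int) : List (Int × Int) :=
  xs.filter (fun p => pyGroupByTens p.1 == t)

def pvSeg (xs : List (Int × Int)) (t : Int) : List (Int × Int) :=
  PySem.List.sorted (pvBucket xs t) (fun y => y.2) true

def pvGroups (xs : List (Int × Int)) : List Int :=
  PySem.List.sorted (PySem.Set.ofList (xs.map (fun p => pyGroupByTens p.1))) (fun x => x) false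

-- insertBy facts
theorem insertBy_nil {α : Type} (B : α → α → Bool) (x : α) :
    PySem.List.insertBy B x [] = [x] := rfl

theorem insertBy_cons {α : Type} (B : α → α → Bool) (x a : α) (L : List α) :
    PySem.List.insertBy B x (a :: L) =
      if B x a then x :: a :: L else a :: PySem.List.insertBy B x L := rfl

theorem insertBy_append_of_not_before {α : Type} (B : α → α → Bool) (x : α) (A C : List α)
    (h : ∀ y ∈ A, B x y = false) :
    PySem.List.insertBy B x (A ++ C) = A ++ PySem.List.insertBy B x C := by
  induction A with
  | nil => simp
  | cons a A ih =>
    rw [List.cons_append, insertBy_cons, h a (by simp), if_neg (by simp),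
      ih (fun y hy => h y (by simp [hy])), List.cons_append]

theorem insertBy_append_right {α : Type} (B : α → α → Bool) (x : α) (A C : List α)
    (h : C = [] ∨ ∃ c cs, C = c :: cs ∧ B x c = true) :
    PySem.List.insertBy B x (A ++ C) = PySem.List.insertBy B x A ++ C := by
  induction A with
  | nil =>
    rcases h with h | ⟨c, cs, rfl, hc⟩
    · simp [h, insertBy_nil]
    · simp [insertBy_cons, insertBy_nil, hc]
  | cons a A ih =>
    by_cases hax : B x a
    · simp [insertBy_cons, hax]
    · rw [List.cons_append, insertBy_cons, if_neg (by simp [hax]), ih,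
        insertBy_cons, if_neg (by simp [hax]), List.cons_append]

theorem insertBy_congr {α : Type} (B B' : α → α → Bool) (x : α) (ys : List α)
    (h : ∀ y ∈ ys, B x y = B' x y) :
    PySem.List.insertBy B x ys = PySem.List.insertBy B' x ys := by
  induction ys with
  | nil => rfl
  | cons y ys ih =>
    rw [insertBy_cons, insertBy_cons, h y (by simp),
      ih (fun z hz => h z (by simp [hz]))]

theorem flatMap_head {α : Type} (l : List Int) (f : Int → List α) (c : α) (cs : List α)
    (h : l.flatMap f = c :: cs) : ∃ q ∈ l, c ∈ f q := by
  have : c ∈ l.flatMap f := by rw [h]; exact List.mem_cons_self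
  simpa using List.mem_flatMap.mp this

theorem flatMap_congr {α : Type} (l : List Int) (f g : Int → List α)
    (h : ∀ a ∈ l, f a = g a) : l.flatMap f = l.flatMap g := by
  induction l with
  | nil => rfl
  | cons a l ih => simp [List.flatMap_cons, h a (by simp), ih (fun b hb => h b (by simp [hb]))]

-- members of a bucket / segment have the right group key
theorem mem_pvBucket {xs : List (Int × Int)} {t : Int} {y : Int × Int}
    (h : y ∈ pvBucket xs t) : pyGroupByTens y.1 = t := by
  have := (List.mem_filter.mp h).2
  simpa using this

theorem mem_pvSeg {xs : List (Int × Int)} {t : Int} {y : Int × Int}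
    (h : y ∈ pvSeg xs t) : pyGroupByTens y.1 = t :=
  mem_pvBucket ((PySem.List.mem_sorted _ _ _ _).mp h)

-- pvLex facts
theorem pvLex_of_lt {x y : Int × Int} (h : pyGroupByTens y.1 < pyGroupByTens x.1) :
    pvLex x y = false := by
  unfold pvLex
  rw [decide_eq_false (by omega), decide_eq_true h]
  rfl

theorem pvLex_of_gt {x y : Int × Int} (h : pyGroupByTens x.1 < pyGroupByTens y.1) :
    pvLex x y = true := by
  unfold pvLex
  rw [decide_eq_true h]
  rfl

theorem pvLex_of_eq {x y : Int × Int} (h : pyGroupByTens x.1 = pyGroupByTens y.1) :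
    pvLex x y = pvW x y := by
  unfold pvLex pvW
  rw [decide_eq_false (by omega), decide_eq_false (by omega)]
  simp only [Bool.false_or, Bool.not_false, Bool.true_and]
  exact decide_eq_decide.mpr (by omega)

-- pvBucket after appending one element
theorem pvBucket_append_self (xs : List (Int × Int)) (x : Int × Int) :
    pvBucket (xs ++ [x]) (pyGroupByTens x.1) = pvBucket xs (pyGroupByTens x.1) ++ [x] := by
  simp [pvBucket, List.filter_append]

theorem pvBucket_append_ne (xs : List (Int × Int)) (x : Int × Int) (t : Int)
    (h : pyGroupByTens x.1 ≠ t) : pvBucket (xs ++ [x]) t = pvBucket xs t := by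
  simp [pvBucket, List.filter_append, h]

-- pvSeg after appending one element of group t
theorem pvSeg_append (xs : List (Int × Int)) (x : Int × Int) :
    pvSeg (xs ++ [x]) (pyGroupByTens x.1) =
      PySem.List.insertBy pvW x (pvSeg xs (pyGroupByTens x.1)) := by
  unfold pvSeg
  rw [pvBucket_append_self, PySem.List.sorted_rev_eq_foldl_insertBy,
    PySem.List.sorted_rev_eq_foldl_insertBy, List.foldl_append]
  rfl

theorem pvSeg_append_ne (xs : List (Int × Int)) (x : Int × Int) (t : Int)
    (h : pyGroupByTens x.1 ≠ t) : pvSeg (xs ++ [x]) t = pvSeg xs t := by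
  unfold pvSeg
  rw [pvBucket_append_ne xs x t h]

-- MAIN LEMMA: a lexicographic stable insertion sort is the concatenation of the
-- per-group stable sorts, taken over any strictly increasing list covering all groups.
theorem lex_sort_decomp (ts : List Int) (xs : List (Int × Int))
    (hts : ts.Pairwise (· < ·)) (hcov : ∀ p ∈ xs, pyGroupByTens p.1 ∈ ts) :
    xs.foldl (fun acc x => PySem.List.insertBy pvLex x acc) [] =
      ts.flatMap (fun t => pvSeg xs t) := by
  induction xs using List.reverseRecOn with
  | nil =>
    have : ∀ t ∈ ts, pvSeg ([] : List (Int × Int)) t = [] := by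
      intro t _; rfl
    simp [flatMap_congr ts _ _ this]
  | append_singleton xs x ih =>
    have hcov' : ∀ p ∈ xs, pyGroupByTens p.1 ∈ ts := fun p hp => hcov p (by simp [hp])
    have ht : pyGroupByTens x.1 ∈ ts := hcov x (by simp)
    obtain ⟨P, Q, hPQ⟩ := List.append_of_mem ht
    subst hPQ
    have hpair := List.pairwise_append.mp hts
    have hPlt : ∀ p ∈ P, p < pyGroupByTens x.1 := fun p hp => hpair.2.2 p hp _ (by simp)
    have hQgt : ∀ q ∈ Q, pyGroupByTens x.1 < q := fun q hq =>
      (List.pairwise_cons.mp hpair.2.1).1 q hq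
    rw [List.foldl_append, ih hcov' , List.foldl_cons, List.foldl_nil]
    -- left side: insert x into the concatenation of the segments of xs
    have hmemP : ∀ y ∈ P.flatMap (fun t => pvSeg xs t), pvLex x y = false := by
      intro y hy
      obtain ⟨p, hp, hyp⟩ := List.mem_flatMap.mp hy
      exact pvLex_of_lt (by rw [mem_pvSeg hyp]; exact hPlt p hp)
    rw [List.flatMap_append, List.flatMap_cons,
      insertBy_append_of_not_before _ _ _ _ hmemP]
    -- now insert into (pvSeg xs t ++ flatMap Q …)
    have hright : Q.flatMap (fun t => pvSeg xs t) = [] ∨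
        ∃ c cs, Q.flatMap (fun t => pvSeg xs t) = c :: cs ∧ pvLex x c = true := by
      cases hC : Q.flatMap (fun t => pvSeg xs t) with
      | nil => exact Or.inl rfl
      | cons c cs =>
        refine Or.inr ⟨c, cs, rfl, ?_⟩
        obtain ⟨q, hq, hcq⟩ := flatMap_head _ _ _ _ hC
        exact pvLex_of_gt (by rw [mem_pvSeg hcq]; exact hQgt q hq)
    rw [insertBy_append_right _ _ _ _ hright,
      insertBy_congr pvLex pvW x _ (fun y hy => pvLex_of_eq (mem_pvSeg hy).symm),
      ← pvSeg_append]
    -- right side: only the t-segment changes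
    rw [List.flatMap_append, List.flatMap_cons]
    congr 1
    · exact flatMap_congr _ _ _ (fun p hp =>
        (pvSeg_append_ne xs x p (by have := hPlt p hp; omega)).symm)
    · congr 1
      exact flatMap_congr _ _ _ (fun q hq =>
        (pvSeg_append_ne xs x q (by have := hQgt q hq; omega)).symm)

-- dictionary bookkeeping helpers
theorem find?_map_of_mem (Gl : List Int) (bkt : Int → List (Int × Int)) (t : Int)
    (ht : t ∈ Gl) (rest : List (Int × (List (Int × Int)))) :
    List.find? (fun p => p.1 == t) (Gl.map (fun u => (u, bkt u)) ++ rest) =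
      some (t, bkt t) := by
  induction Gl with
  | nil => simp at ht
  | cons u Gl ih =>
    by_cases hu : u = t
    · subst hu; simp
    · rw [List.map_cons, List.cons_append, List.find?_cons_of_neg (by simp [hu])]
      refine ih ?_ 
      rcases List.mem_cons.mp ht with h | h
      · exact absurd h.symm hu
      · exact h

theorem find?_map_of_not_mem (Gl : List Int) (bkt : Int → List (Int × Int)) (t : Int)
    (ht : t ∉ Gl) (rest : List (Int × (List (Int × Int)))) :
    List.find? (fun p => p.1 == t) (Gl.map (fun u => (u, bkt u)) ++ rest) =
      List.find? (fun p => p.1 == t) rest := by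
  induction Gl with
  | nil => simp
  | cons u Gl ih =>
    rw [List.map_cons, List.cons_append,
      List.find?_cons_of_neg (by simp; rintro rfl; exact ht (by simp))]
    exact ih (fun h => ht (by simp [h]))

theorem ofList_append_singleton (l : List Int) (a : Int) :
    PySem.Set.ofList (l ++ [a]) =
      if a ∈ PySem.Set.ofList l then PySem.Set.ofList l else PySem.Set.ofList l ++ [a] := by
  rw [PySem.Set.ofList, List.foldl_append]
  show PySem.Set.add _ a = _
  rw [PySem.Set.add]
  by_cases h : a ∈ PySem.Set.ofList l
  · rw [if_pos (by simpa [PySem.Set.ofList] using h), if_pos h]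
    rfl
  · rw [if_neg (by simpa [PySem.Set.ofList] using h), if_neg h]
    rfl

theorem pvBucket_eq_nil (xs : List (Int × Int)) (t : Int)
    (h : t ∉ xs.map (fun p => pyGroupByTens p.1)) : pvBucket xs t = [] := by
  rw [pvBucket, List.filter_eq_nil_iff]
  intro p hp
  simp only [beq_iff_eq]
  intro he
  exact h (List.mem_map.mpr ⟨p, hp, he⟩)

-- A-side: the grouped dict's items
theorem grouped_items (xs : List (Int × Int)) :
    (xs.foldl (fun d p =>
      let tens := pyGroupByTens p.1
      let d' := if ¬ d.contains tens then d.insert tens ([] : List (Int × Int)) else d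
      d'.modify tens [] (fun l => l ++ [p])) PySem.Dict.empty).items =
    (PySem.Set.ofList (xs.map (fun p => pyGroupByTens p.1))).map (fun t => (t, pvBucket xs t)) := by
  induction xs using List.reverseRecOn with
  | nil => rfl
  | append_singleton xs x ih =>
    rw [List.foldl_append, List.foldl_cons, List.foldl_nil]
    set t := pyGroupByTens x.1 with ht
    set D := xs.foldl (fun d p =>
      let tens := pyGroupByTens p.1
      let d' := if ¬ d.contains tens then d.insert tens ([] : List (Int × Int)) else d
      d'.modify tens [] (fun l => l ++ [p])) PySem.Dict.empty with hDdef
    set Gl := PySem.Set.ofList (xs.map (fun p => pyGroupByTens p.1)) with hGl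
    have hD : D.items = Gl.map (fun u => (u, pvBucket xs u)) := ih
    have hDmk : D = ⟨Gl.map (fun u => (u, pvBucket xs u))⟩ := PySem.Dict.ext hD
    rw [List.map_append, List.map_cons, List.map_nil, ofList_append_singleton, ← hGl, ← ht]
    rw [show (let tens := t;
        let d' := if ¬D.contains tens = true then D.insert tens ([] : List (Int × Int)) else D;
        d'.modify tens [] fun l => l ++ [x]) =
      (if ¬D.contains t = true then D.insert t ([] : List (Int × Int)) else D).modify t []
        (fun l => l ++ [x]) from rfl]
    by_cases hm : t ∈ Gl
    · rw [if_pos hm]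
      have hcon : D.contains t = true := by
        rw [hDmk, PySem.Dict.contains]
        exact List.any_eq_true.mpr ⟨(t, pvBucket xs t), by
          exact List.mem_map.mpr ⟨t, hm, rfl⟩, by simp⟩
      have hget : D.getD t [] = pvBucket xs t := by
        rw [hDmk]
        show (Option.map (fun x => x.2) (List.find? (fun p => p.1 == t)
          (Gl.map (fun u => (u, pvBucket xs u))))).getD [] = _
        rw [show Gl.map (fun u => (u, pvBucket xs u)) =
            Gl.map (fun u => (u, pvBucket xs u)) ++ [] from (List.append_nil _).symm,
          find?_map_of_mem Gl _ t hm []]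
        rfl
      rw [show (if ¬D.contains t = true then D.insert t ([] : List (Int × Int)) else D) = D by
        rw [hcon]; simp]
      rw [PySem.Dict.modify, hget, PySem.Dict.insert, if_pos hcon, hDmk]
      show (Gl.map (fun u => (u, pvBucket xs u))).map
          (fun p : Int × List (Int × Int) =>
            if p.1 == t then (t, pvBucket xs t ++ [x]) else p) = _
      rw [List.map_map]
      apply List.map_congr_left
      intro u hu
      by_cases hut : u = t
      · subst hut
        simp only [Function.comp, beq_self_eq_true, if_pos]
        rw [ht, pvBucket_append_self]
      · simp only [Function.comp, beq_iff_eq, if_neg hut]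
        rw [pvBucket_append_ne xs x u (by rw [← ht]; exact fun h => hut h.symm)]
    · rw [if_neg hm]
      have hcon : D.contains t = false := by
        rw [hDmk, PySem.Dict.contains]
        refine List.any_eq_false.mpr ?_
        intro p hp
        obtain ⟨u, hu, he⟩ := List.mem_map.mp hp
        subst he
        exact fun hbt => hm ((beq_iff_eq.mp hbt) ▸ hu)
      rw [show (if ¬D.contains t = true then D.insert t ([] : List (Int × Int)) else D) =
          D.insert t ([] : List (Int × Int)) by rw [hcon]; simp]
      rw [PySem.Dict.modify]
      have hins : D.insert t [] = ⟨Gl.map (fun u => (u, pvBucket xs u)) ++ [(t, [])]⟩ := by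
        rw [PySem.Dict.insert, if_neg (by simp [hcon]), hDmk]
      rw [hins]
      have hcon2 : (PySem.Dict.contains ⟨Gl.map (fun u => (u, pvBucket xs u)) ++ [(t, [])]⟩ t) = true := by
        rw [PySem.Dict.contains]
        exact List.any_eq_true.mpr ⟨(t, []), by simp, by simp⟩
      have hget2 : (PySem.Dict.getD ⟨Gl.map (fun u => (u, pvBucket xs u)) ++ [(t, [])]⟩ t []) = [] := by
        show (Option.map (fun x => x.2) (List.find? (fun p => p.1 == t)
          (Gl.map (fun u => (u, pvBucket xs u)) ++ [(t, [])]))).getD [] = _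
        rw [find?_map_of_not_mem Gl _ t hm]
        simp
      rw [hget2, PySem.Dict.insert, if_pos hcon2]
      show ((Gl.map (fun u => (u, pvBucket xs u)) ++ [(t, [])]).map
          (fun p : Int × List (Int × Int) => if p.1 == t then (t, [] ++ [x]) else p)) = _
      rw [List.map_append, List.map_map, List.map_append]
      congr 1
      · apply List.map_congr_left
        intro u hu
        simp only [Function.comp, beq_iff_eq, if_neg (fun h : u = t => hm (h ▸ hu))]
        rw [pvBucket_append_ne xs x u (by rw [← ht]; exact fun h => hm ((h ▸ rfl : u = t) ▸ hu))]
      · simp only [List.map_cons, List.map_nil, beq_self_eq_true, if_pos]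
        have : pvBucket (xs ++ [x]) t = [x] := by
          rw [ht, pvBucket_append_self, pvBucket_eq_nil xs _ (by
            rw [← ht]; exact fun h => hm ((PySem.Set.mem_ofList _ _).mpr h)), List.nil_append]
        rw [this]
        simp

-- A-side: sorting the grouped items by key
theorem sorted_grouped_items (xs : List (Int × Int)) :
    PySem.List.sorted ((PySem.Set.ofList (xs.map (fun p => pyGroupByTens p.1))).map
        (fun t => (t, pvBucket xs t))) (fun x => x.1) false =
      (pvGroups xs).map (fun t => (t, pvBucket xs t)) := by
  apply PySem.List.sorted_eq_of_perm_of_pairwise_lt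
  · exact (PySem.List.sorted_perm _ _ _).map _
  · exact (PySem.List.sorted_ofList_pairwise_lt _).map _ (fun a b h => h)

-- B-side scan lemmas
theorem altScan_restart (t : Int) (c : Int) (p : Int × Int) (r : List (Int × Int))
    (h : pyGroupByTens p.1 ≠ t) :
    altScan (some t) c (p :: r) = altScan none 0 (p :: r) := by
  simp [altScan, h]

theorem altScan_seg (seg : List (Int × Int)) (t : Int) :
    ∀ (c : Int), 0 ≤ c → (∀ y ∈ seg, pyGroupByTens y.1 = t) →
    ∀ rest : List (Int × Int),
      (rest = [] ∨ ∃ p r, rest = p :: r ∧ pyGroupByTens p.1 ≠ t) →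
    altScan (some t) c (seg ++ rest) =
      (seg.take (6 - c).toNat).map (fun y => y.1) ++ altScan none 0 rest := by
  induction seg with
  | nil =>
    intro c _ _ rest hrest
    rcases hrest with rfl | ⟨p, r, rfl, hp⟩
    · simp [altScan]
    · simpa using altScan_restart t c p r hp
  | cons y seg ih =>
    intro c hc hseg rest hrest
    have hy : pyGroupByTens y.1 = t := hseg y (by simp)
    by_cases h6 : c < 6
    · have htake : ((6 : Int) - c).toNat = ((6 : Int) - (c + 1)).toNat + 1 := by omega
      rw [List.cons_append, show altScan (some t) c (y :: (seg ++ rest)) =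
          y.1 :: altScan (some t) (c + 1) (seg ++ rest) by simp [altScan, hy, h6],
        ih (c + 1) (by omega) (fun z hz => hseg z (by simp [hz])) rest hrest,
        htake, List.take_succ_cons]
      simp
    · have htake : ((6 : Int) - c).toNat = 0 := by omega
      rw [List.cons_append, show altScan (some t) c (y :: (seg ++ rest)) =
          altScan (some t) c (seg ++ rest) by simp [altScan, hy, h6],
        ih c hc (fun z hz => hseg z (by simp [hz])) rest hrest, htake]
      simp

-- B-side: the scan over a flatMap of segments takes 6 per segment
theorem altScan_flatMap (ss : List Int) (seg : Int → List (Int × Int))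
    (hseg : ∀ t ∈ ss, ∀ y ∈ seg t, pyGroupByTens y.1 = t)
    (hne : ss.Pairwise (· ≠ ·)) :
    altScan none 0 (ss.flatMap seg) = ss.flatMap (fun t => ((seg t).take 6).map (fun y => y.1)) := by
  induction ss with
  | nil => rfl
  | cons t ss ih =>
    have hpc := List.pairwise_cons.mp hne
    have hrest : ss.flatMap seg = [] ∨
        ∃ p r, ss.flatMap seg = p :: r ∧ pyGroupByTens p.1 ≠ t := by
      cases hC : ss.flatMap seg with
      | nil => exact Or.inl rfl
      | cons c cs =>
        obtain ⟨q, hq, hcq⟩ := flatMap_head _ _ _ _ hC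
        exact Or.inr ⟨c, cs, rfl, by rw [hseg q (by simp [hq]) c hcq]; exact (hpc.1 q hq).symm⟩
    have ihs : altScan none 0 (ss.flatMap seg) =
        ss.flatMap (fun t => ((seg t).take 6).map (fun y => y.1)) :=
      ih (fun u hu => hseg u (by simp [hu])) hpc.2
    rw [List.flatMap_cons, List.flatMap_cons]
    cases hS : seg t with
    | nil =>
      rw [List.nil_append, ihs]
      simp
    | cons y s =>
      have hy : pyGroupByTens y.1 = t := hseg t (by simp) y (by rw [hS]; simp)
      have hs : ∀ z ∈ s, pyGroupByTens z.1 = t := fun z hz =>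
        hseg t (by simp) z (by rw [hS]; simp [hz])
      rw [List.cons_append, show altScan none 0 (y :: (s ++ ss.flatMap seg)) =
          y.1 :: altScan (some t) 1 (s ++ ss.flatMap seg) by simp [altScan, hy],
        altScan_seg s t 1 (by omega) hs _ hrest, ihs]
      simp [List.take_succ_cons]

-- ===== VERDICT (by name: the statement is the Claim_ definition above) =====
theorem get_most_common_by_tens_spec : Claim_equal_get_most_common_by_tens := by
  intro data _
  unfold Spec_get_most_common_by_tens get_most_common_by_tens get_most_common_by_tens_alt
  set xs := (PySem.Dict.counter (data.flatMap (fun row => row))).items with hxs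
  have hts : (pvGroups xs).Pairwise (· < ·) := PySem.List.sorted_ofList_pairwise_lt _
  have hcov : ∀ p ∈ xs, pyGroupByTens p.1 ∈ pvGroups xs := by
    intro p hp
    rw [pvGroups, PySem.List.mem_sorted, PySem.Set.mem_ofList]
    exact List.mem_map.mpr ⟨p, hp, rfl⟩
  have hB : PySem.List.sorted2 xs (fun kv => pyGroupByTens kv.1) (fun kv => -kv.2) false =
      xs.foldl (fun acc x => PySem.List.insertBy pvLex x acc) [] := rfl
  show (PySem.List.sorted ((xs.foldl (fun d p =>
      let tens := pyGroupByTens p.1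
      let d' := if ¬ d.contains tens then d.insert tens ([] : List (Int × Int)) else d
      d'.modify tens [] (fun l => l ++ [p])) PySem.Dict.empty).items) (fun x => x.1) false).foldl
      (fun acc p => acc ++ ((PySem.List.sorted p.2 (fun y => y.2) true).take 6).map (fun y => y.1)) [] =
    altScan none 0 (PySem.List.sorted2 xs (fun kv => pyGroupByTens kv.1) (fun kv => -kv.2) false)
  rw [grouped_items xs, sorted_grouped_items xs,
    PySem.List.foldl_append_eq_flatMap, List.nil_append, List.flatMap_map, hB,
    lex_sort_decomp (pvGroups xs) xs hts hcov,
    altScan_flatMap _ _ (fun t _ y hy => mem_pvSeg hy) (hts.imp ne_of_lt)]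
  rfl
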